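-- pv_equiv track=rewrite | github.com/AnchitSharma/credit-risk | main - Copy.py | class_loan_app
-- ===== SOURCE A (Python) =====
-- def class_loan_app(wd_list):
--     also_check_app_word = ["loan application form"]
--     vb_2 = [wd for wd in wd_list if any(x in wd.lower() for x in also_check_app_word)]
--     if len(vb_2) > 0:
--         return True
--
--     vb_1 = [wd for wd in wd_list if all(x in wd.lower() for x in ['two wheeler', 'loan', 'applicati'])]
--     if len(vb_1) > 0:
--         return True
--
--     return False
-- ===== SOURCE B (Python) =====
-- def class_loan_app(wd_list):
--     for wd in wd_list:
--         low = wd.lower()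
--         if "loan application form" in low:
--             return True
--         if "two wheeler" in low and "loan" in low and "applicati" in low:
--             return True
--     return False
-- ===== Notes on version B (the rewrite author's own statement) =====
-- stated objective: simpler
-- what changed: Replaces A's two full filter passes (build vb_2, then vb_1, then test their lengths) with one short-circuiting single pass that lowercases each word once and returns as soon as either predicate fires.
import Mathlib
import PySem

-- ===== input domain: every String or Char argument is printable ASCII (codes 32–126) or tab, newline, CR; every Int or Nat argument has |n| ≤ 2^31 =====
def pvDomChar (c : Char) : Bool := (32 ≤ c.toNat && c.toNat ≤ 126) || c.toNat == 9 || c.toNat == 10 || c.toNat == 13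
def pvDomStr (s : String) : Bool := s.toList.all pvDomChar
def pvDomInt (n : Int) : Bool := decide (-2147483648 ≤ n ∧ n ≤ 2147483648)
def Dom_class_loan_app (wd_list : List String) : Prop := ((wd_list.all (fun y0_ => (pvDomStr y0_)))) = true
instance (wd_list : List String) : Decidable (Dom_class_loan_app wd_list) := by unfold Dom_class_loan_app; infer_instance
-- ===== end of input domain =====

-- B replaces A's two full filter passes with one short-circuiting single pass (objective: simpler).

-- ===== PORT A =====
def class_loan_app (wd_list : List String) : Bool :=
  let also_check_app_word := ["loan application form"]
  let vb_2 := wd_list.filter (fun wd =>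
    also_check_app_word.any (fun x => PySem.Str.isIn x (PySem.Str.lower wd)))
  if vb_2.length > 0 then true
  else
    let vb_1 := wd_list.filter (fun wd =>
      ["two wheeler", "loan", "applicati"].all (fun x => PySem.Str.isIn x (PySem.Str.lower wd)))
    if vb_1.length > 0 then true
    else false

-- ===== PORT B =====
def class_loan_app_alt : List String → Bool
  | [] => false
  | wd :: rest =>
    let low := PySem.Str.lower wd
    if PySem.Str.isIn "loan application form" low then true
    else if PySem.Str.isIn "two wheeler" low && PySem.Str.isIn "loan" low
            && PySem.Str.isIn "applicati" low then true
    else class_loan_app_alt rest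

-- ===== PRECONDITION & SPEC =====
def Spec_class_loan_app (wd_list : List String) (out : Bool) : Prop := out = class_loan_app_alt wd_list
instance (wd_list : List String) (out : Bool) : Decidable (Spec_class_loan_app wd_list out) := by unfold Spec_class_loan_app; infer_instance

-- ===== CLAIM (what is proved, stated in full; the proofs are below) =====
def Claim_equal_class_loan_app : Prop := ∀ (wd_list : List String), Dom_class_loan_app wd_list → Spec_class_loan_app wd_list (class_loan_app wd_list)

-- ===== LEMMAS AND PROOFS =====

def pvC1 (wd : String) : Bool := PySem.Str.isIn "loan application form" (PySem.Str.lower wd)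
def pvC2 (wd : String) : Bool :=
  PySem.Str.isIn "two wheeler" (PySem.Str.lower wd) &&
    (PySem.Str.isIn "loan" (PySem.Str.lower wd) && PySem.Str.isIn "applicati" (PySem.Str.lower wd))

theorem filter_pos_any {a : Type} (p : a -> Bool) (l : List a) :
    (0 < (l.filter p).length) = (l.any p = true) := by
  rw [eq_iff_iff, List.length_pos_iff, ne_eq, List.filter_eq_nil_iff]
  simp [List.any_eq_true]

theorem class_loan_app_eq_any (l : List String) :
    class_loan_app l = (l.any pvC1 || l.any pvC2) := by
  simp only [class_loan_app, List.any_cons, List.any_nil, List.all_cons, List.all_nil,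
    Bool.or_false, Bool.and_true, filter_pos_any]
  by_cases h1 : l.any (fun wd => PySem.Str.isIn "loan application form" (PySem.Str.lower wd)) = true
  · rw [if_pos h1, (show l.any pvC1 = true from h1), Bool.true_or]
  · rw [if_neg h1]
    have e1 : l.any pvC1 = false := Bool.not_eq_true _ |>.mp h1
    by_cases h2 : l.any (fun wd => PySem.Str.isIn "two wheeler" (PySem.Str.lower wd) &&
        (PySem.Str.isIn "loan" (PySem.Str.lower wd) &&
          PySem.Str.isIn "applicati" (PySem.Str.lower wd))) = true
    · rw [if_pos h2, e1, (show l.any pvC2 = true from h2), Bool.false_or]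
    · rw [if_neg h2, e1, (show l.any pvC2 = false from Bool.not_eq_true _ |>.mp h2), Bool.false_or]

theorem class_loan_app_alt_eq_any (l : List String) :
    class_loan_app_alt l = l.any (fun wd => pvC1 wd || pvC2 wd) := by
  induction l with
  | nil => rfl
  | cons wd rest ih =>
    simp only [class_loan_app_alt, List.any_cons]
    rw [ih]
    split_ifs with h1 h2 <;> simp_all [pvC1, pvC2]

theorem any_or_split (l : List String) :
    l.any (fun wd => pvC1 wd || pvC2 wd) = (l.any pvC1 || l.any pvC2) := by
  induction l with
  | nil => rfl
  | cons wd rest ih =>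
    simp only [List.any_cons, ih]
    cases pvC1 wd <;> cases pvC2 wd <;> simp

-- ===== VERDICT (by name: the statement is the Claim_ definition above) =====
theorem class_loan_app_spec : Claim_equal_class_loan_app := by
  intro l _
  unfold Spec_class_loan_app
  rw [class_loan_app_eq_any, class_loan_app_alt_eq_any, any_or_split]
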